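-- pv_equiv track=rewrite | github.com/lfletcher23/double-major-optimization | Model/setup_model.py | get_program_run_name
-- ===== SOURCE A (Python) =====
-- def get_program_run_name(program_keys):
--     if len(program_keys) < 2:
--         program_run_name = program_keys[0] + "_ONLY"
--     else:
--         major_keys = []
--         for each_program in program_keys:
--             major_keys.append(each_program.split("_")[0])
--         major_keys.sort()
--         program_run_name = major_keys[0] + "_" + major_keys[1] + "_DOUBLE"
--     return program_run_name
-- ===== SOURCE B (Python) =====
-- def get_program_run_name(program_keys):
--     if len(program_keys) < 2:
--         return program_keys[0] + "_ONLY"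
--     m1 = program_keys[0].split("_")[0]
--     m2 = program_keys[1].split("_")[0]
--     if m2 < m1:
--         m1, m2 = m2, m1
--     for p in program_keys[2:]:
--         k = p.split("_")[0]
--         if k < m1:
--             m1, m2 = k, m1
--         elif k < m2:
--             m2 = k
--     return m1 + "_" + m2 + "_DOUBLE"
-- ===== Notes on version B (the rewrite author's own statement) =====
-- stated objective: alternative
-- what changed: Replaces building and sorting the whole major-key list with a single pass that tracks the two lexicographically smallest keys (min1/min2).
import Mathlib
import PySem

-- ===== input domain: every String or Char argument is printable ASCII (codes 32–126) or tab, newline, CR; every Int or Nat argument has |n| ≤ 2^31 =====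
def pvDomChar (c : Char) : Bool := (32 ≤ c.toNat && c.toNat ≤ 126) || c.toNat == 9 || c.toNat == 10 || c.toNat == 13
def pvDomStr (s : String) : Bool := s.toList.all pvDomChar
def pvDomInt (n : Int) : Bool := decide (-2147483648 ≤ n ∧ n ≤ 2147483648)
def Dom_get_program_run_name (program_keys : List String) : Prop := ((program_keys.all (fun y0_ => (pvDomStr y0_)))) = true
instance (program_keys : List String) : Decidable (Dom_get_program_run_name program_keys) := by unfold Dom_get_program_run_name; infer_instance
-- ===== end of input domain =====

-- B replaces A's build-then-sort of the major-key list with a single pass keeping the two smallest keys (alternative algorithm, same result).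

-- ===== PORT A =====
-- each_program.split("_")[0]: sep "_" is nonempty so split? is some, and the split list is never empty, so getD/headD are exact
def pvMajorKey (s : String) : String := ((PySem.Str.split? s "_").getD []).headD ""

def get_program_run_name (program_keys : List String) : String :=
  if program_keys.length < 2 then
    -- program_keys[0]: Python raises IndexError on []; Pre_ excludes the empty list
    PySem.List.pyGetD program_keys 0 "" ++ "_ONLY"
  else
    let major_keys := program_keys.foldl (fun acc p => acc ++ [pvMajorKey p]) []
    let sorted_keys := PySem.List.sorted major_keys (fun x => x) false
    PySem.List.pyGetD sorted_keys 0 "" ++ "_" ++ PySem.List.pyGetD sorted_keys 1 "" ++ "_DOUBLE"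

-- ===== PORT B =====
def pvAltStep (mm : String × String) (p : String) : String × String :=
  let k := pvMajorKey p
  if k < mm.1 then (k, mm.1) else if k < mm.2 then (mm.1, k) else mm

def get_program_run_name_alt (program_keys : List String) : String :=
  if program_keys.length < 2 then
    PySem.List.pyGetD program_keys 0 "" ++ "_ONLY"
  else
    let m1 := pvMajorKey (PySem.List.pyGetD program_keys 0 "")
    let m2 := pvMajorKey (PySem.List.pyGetD program_keys 1 "")
    let init := if m2 < m1 then (m2, m1) else (m1, m2)
    let r := (program_keys.drop 2).foldl pvAltStep init   -- program_keys[2:]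
    r.1 ++ "_" ++ r.2 ++ "_DOUBLE"

-- ===== PRECONDITION & SPEC =====
-- Pre_ excludes only the empty list, on which the Python A raises IndexError at program_keys[0]
def Pre_get_program_run_name (program_keys : List String) : Prop := program_keys ≠ []
instance (program_keys : List String) : Decidable (Pre_get_program_run_name program_keys) := by unfold Pre_get_program_run_name; infer_instance
def pvWitness_get_program_run_name : List String := ["CS_major", "MATH_major"]

def Spec_get_program_run_name (program_keys : List String) (out : String) : Prop := out = get_program_run_name_alt program_keys
instance (program_keys : List String) (out : String) : Decidable (Spec_get_program_run_name program_keys out) := by unfold Spec_get_program_run_name; infer_instance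

-- ===== CLAIM (what is proved, stated in full; the proofs are below) =====
def Claim_equal_get_program_run_name : Prop := ∀ (program_keys : List String), Dom_get_program_run_name program_keys → Pre_get_program_run_name program_keys → Spec_get_program_run_name program_keys (get_program_run_name program_keys)

-- ===== LEMMAS AND PROOFS =====

-- pvAltStep in terms of the bare-key step (to push the fold through map pvMajorKey)
def pvStep2 (mm : String × String) (k : String) : String × String :=
  if k < mm.1 then (k, mm.1) else if k < mm.2 then (mm.1, k) else mm

-- invariant of the two-smallest pass: the pair is the two smallest of a::b::l (in order),
-- the rest is everything else, and the second component never exceeds x ∈ rest (nor b)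
lemma pv_fold_two_min (l : List String) :
    ∀ (a b : String), a ≤ b →
      ∃ rest : List String,
        ((l.foldl pvStep2 (a, b)).1 :: (l.foldl pvStep2 (a, b)).2 :: rest).Perm (a :: b :: l)
        ∧ (l.foldl pvStep2 (a, b)).1 ≤ (l.foldl pvStep2 (a, b)).2
        ∧ (l.foldl pvStep2 (a, b)).2 ≤ b
        ∧ ∀ x ∈ rest, (l.foldl pvStep2 (a, b)).2 ≤ x := by
  induction l with
  | nil =>
      intro a b hab
      exact ⟨[], List.Perm.refl _, hab, le_refl _, by simp⟩
  | cons k l ih =>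
      intro a b hab
      simp only [List.foldl_cons]
      by_cases h1 : k < a
      · -- new pair (k, a); b is discarded
        have hstep : pvStep2 (a, b) k = (k, a) := by simp [pvStep2, h1]
        rw [hstep]
        obtain ⟨rest, hperm, hle, hb, hrest⟩ := ih k a (le_of_lt h1)
        refine ⟨b :: rest, ?_, hle, le_trans hb hab, ?_⟩
        · -- (m1 :: m2 :: b :: rest) ~ (a :: b :: k :: l)
          have s1 : ((l.foldl pvStep2 (k, a)).1 :: (l.foldl pvStep2 (k, a)).2 :: b :: rest).Perm
              (b :: (l.foldl pvStep2 (k, a)).1 :: (l.foldl pvStep2 (k, a)).2 :: rest) :=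
            @List.perm_middle _ b [(l.foldl pvStep2 (k, a)).1, (l.foldl pvStep2 (k, a)).2] rest
          have s2 : (b :: (l.foldl pvStep2 (k, a)).1 :: (l.foldl pvStep2 (k, a)).2 :: rest).Perm
              (b :: k :: a :: l) := hperm.cons b
          have s3 : (b :: k :: a :: l).Perm (b :: a :: k :: l) := (List.Perm.swap a k l).cons b
          have s4 : (b :: a :: k :: l).Perm (a :: b :: k :: l) := List.Perm.swap a b _
          exact ((s1.trans s2).trans s3).trans s4
        · intro x hx
          rcases List.mem_cons.mp hx with h | h
          · exact h ▸ le_trans hb hab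
          · exact hrest x h
      · by_cases h2 : k < b
        · -- new pair (a, k); b is discarded
          have hstep : pvStep2 (a, b) k = (a, k) := by simp [pvStep2, h1, h2]
          rw [hstep]
          obtain ⟨rest, hperm, hle, hb', hrest⟩ := ih a k (le_of_not_gt h1)
          refine ⟨b :: rest, ?_, hle, le_trans hb' (le_of_lt h2), ?_⟩
          · have s1 : ((l.foldl pvStep2 (a, k)).1 :: (l.foldl pvStep2 (a, k)).2 :: b :: rest).Perm
                (b :: (l.foldl pvStep2 (a, k)).1 :: (l.foldl pvStep2 (a, k)).2 :: rest) :=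
              @List.perm_middle _ b [(l.foldl pvStep2 (a, k)).1, (l.foldl pvStep2 (a, k)).2] rest
            have s2 : (b :: (l.foldl pvStep2 (a, k)).1 :: (l.foldl pvStep2 (a, k)).2 :: rest).Perm
                (b :: a :: k :: l) := hperm.cons b
            have s3 : (b :: a :: k :: l).Perm (a :: b :: k :: l) := List.Perm.swap a b _
            exact (s1.trans s2).trans s3
          · intro x hx
            rcases List.mem_cons.mp hx with h | h
            · exact h ▸ le_trans hb' (le_of_lt h2)
            · exact hrest x h
        · -- pair unchanged; k is discarded
          have hstep : pvStep2 (a, b) k = (a, b) := by simp [pvStep2, h1, h2]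
          rw [hstep]
          obtain ⟨rest, hperm, hle, hb', hrest⟩ := ih a b hab
          refine ⟨k :: rest, ?_, hle, hb', ?_⟩
          · have s1 : ((l.foldl pvStep2 (a, b)).1 :: (l.foldl pvStep2 (a, b)).2 :: k :: rest).Perm
                (k :: (l.foldl pvStep2 (a, b)).1 :: (l.foldl pvStep2 (a, b)).2 :: rest) :=
              @List.perm_middle _ k [(l.foldl pvStep2 (a, b)).1, (l.foldl pvStep2 (a, b)).2] rest
            have s2 : (k :: (l.foldl pvStep2 (a, b)).1 :: (l.foldl pvStep2 (a, b)).2 :: rest).Perm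
                (k :: a :: b :: l) := hperm.cons k
            have s3 : (k :: a :: b :: l).Perm (a :: b :: k :: l) :=
              @List.perm_middle _ k [a, b] l |>.symm
            exact (s1.trans s2).trans s3
          · intro x hx
            rcases List.mem_cons.mp hx with h | h
            · exact h ▸ le_trans hb' (le_of_not_gt h2)
            · exact hrest x h

-- A's sorted major-key list, named: it is m1 :: m2 :: sorted(rest)
lemma pv_sorted_eq (l : List String) (a b : String) (hab : a ≤ b) :
    ∃ rest : List String,
      PySem.List.sorted (a :: b :: l) (fun x => x) false =
        (l.foldl pvStep2 (a, b)).1 :: (l.foldl pvStep2 (a, b)).2 ::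
          PySem.List.sorted rest (fun x => x) false := by
  obtain ⟨rest, hperm, hle, _, hrest⟩ := pv_fold_two_min l a b hab
  refine ⟨rest, PySem.List.sorted_id_eq_of_perm_of_pairwise _ _ ?_ ?_⟩
  · exact ((PySem.List.sorted_perm rest (fun x => x) false).cons _ |>.cons _).trans hperm
  · refine List.pairwise_cons.mpr ⟨?_, List.pairwise_cons.mpr ⟨?_, ?_⟩⟩
    · intro x hx
      rcases List.mem_cons.mp hx with h | h
      · exact h ▸ hle
      · exact le_trans hle (hrest x ((PySem.List.mem_sorted _ _ _ _).mp h))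
    · intro x hx
      exact hrest x ((PySem.List.mem_sorted _ _ _ _).mp hx)
    · exact PySem.List.sorted_pairwise rest (fun x => x)

-- ===== VERDICT (by name: the statement is the Claim_ definition above) =====
theorem get_program_run_name_spec : Claim_equal_get_program_run_name := by
  intro pk _ hpre
  unfold Spec_get_program_run_name
  match pk, hpre with
  | [p0], _ => rfl
  | p0 :: p1 :: rest2, _ =>
    have hlen : ¬ (p0 :: p1 :: rest2).length < 2 := by simp
    simp only [get_program_run_name, get_program_run_name_alt, if_neg hlen, List.drop_succ_cons,
      List.drop_zero]
    -- the built list of major keys is the map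
    have hmk : (p0 :: p1 :: rest2).foldl (fun acc p => acc ++ [pvMajorKey p]) [] =
        pvMajorKey p0 :: pvMajorKey p1 :: rest2.map pvMajorKey := by
      rw [PySem.List.foldl_append_singleton_eq_map]; rfl
    -- B's fold over the tail, pushed through the map
    have hstepfun : pvAltStep = fun mm p => pvStep2 mm (pvMajorKey p) :=
      funext fun _ => funext fun _ => rfl
    have hfold : ∀ init : String × String,
        rest2.foldl pvAltStep init = (rest2.map pvMajorKey).foldl pvStep2 init := by
      intro init
      rw [hstepfun, List.foldl_map]
    set a0 := pvMajorKey p0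
    set b0 := pvMajorKey p1
    set l := rest2.map pvMajorKey
    have hget0 : PySem.List.pyGetD (p0 :: p1 :: rest2) 0 "" = p0 := by simp [pysem]
    have hget1 : PySem.List.pyGetD (p0 :: p1 :: rest2) 1 "" = p1 := by simp [pysem]
    rw [hmk]
    simp only [hget0, hget1, hfold]
    by_cases hcmp : b0 < a0
    · rw [if_pos hcmp]
      obtain ⟨rest, hsorted⟩ := pv_sorted_eq l b0 a0 (le_of_lt hcmp)
      have hswap : PySem.List.sorted (a0 :: b0 :: l) (fun x => x) false =
          PySem.List.sorted (b0 :: a0 :: l) (fun x => x) false :=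
        PySem.List.sorted_eq_sorted_of_perm _ _ _ (fun _ _ h => h) (List.Perm.swap b0 a0 l)
      rw [hswap, hsorted]
      simp only [pysem, a0, b0]
      rfl
    · rw [if_neg hcmp]
      obtain ⟨rest, hsorted⟩ := pv_sorted_eq l a0 b0 (le_of_not_gt hcmp)
      rw [hsorted]
      simp only [pysem, a0, b0]
      rfl
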